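-- pv_equiv track=rewrite | github.com/Nieeeb/Kingdomino | Modules/NimRod/group_tiles_labels.py | find_tile_group
-- ===== SOURCE A (Python) =====
-- def find_neighbor_tiles(tile_index):
--     row_index, col_index = tile_index
--     neighbors = []
--
--     # Tjek op, ned, venstre og højre naboer
--     # Op
--     if row_index > 0:
--         neighbors.append((row_index - 1, col_index))
--     # Ned
--     if row_index < 4:
--         neighbors.append((row_index + 1, col_index))
--     # Venstre
--     if col_index > 0:
--         neighbors.append((row_index, col_index - 1))
--     # Højre
--     if col_index < 4:
--         neighbors.append((row_index, col_index + 1))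
--
--     return neighbors
--
-- def find_tile_group(tile_index, tiles_dict, visited):
--     # Initialiser en liste til at gemme tiles i gruppen
--     tile_group = []
--
--     # Stack til DFS
--     stack = [tile_index]
--
--     while stack:
--         current_tile = stack.pop()
--         tile_group.append(current_tile)
--         visited.add(current_tile)
--
--         # Find naboer af den aktuelle tile
--         neighbors = find_neighbor_tiles(current_tile)
--
--         # Tilføj naboer til stacken, hvis de har samme label og ikke er besøgte
--         for neighbor in neighbors:
--             if neighbor in tiles_dict and tiles_dict[neighbor] == tiles_dict[tile_index] and neighbor not in visited:
--                 stack.append(neighbor)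
--                 visited.add(neighbor)  # Marker nabo-tile som besøgt
--
--     return tile_group
-- ===== SOURCE B (Python) =====
-- def find_tile_group(tile_index, tiles_dict, visited):
--     # Recursive flood-fill (same return value as the stack version; also marks
--     # the grouped tiles in `visited`, like the original).
--     target = tiles_dict.get(tile_index)
--
--     def dfs(tile):
--         group = [tile]
--         visited.add(tile)
--         r, c = tile
--         kids = [n for n, ok in (((r - 1, c), r > 0), ((r + 1, c), r < 4),
--                                 ((r, c - 1), c > 0), ((r, c + 1), c < 4))
--                 if ok and n in tiles_dict and tiles_dict[n] == target
--                 and n not in visited]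
--         for n in kids:
--             visited.add(n)
--         for n in reversed(kids):
--             group += dfs(n)
--         return group
--
--     return dfs(tile_index)
-- ===== Notes on version B (the rewrite author's own statement) =====
-- stated objective: alternative
-- what changed: The explicit while-loop/stack DFS is replaced by a recursive flood-fill helper that hoists the seed label lookup out of the loop, decides and marks each tile's eligible children once at the parent, and recurses into them in reversed order; equivalence concerns the return value (both also mark grouped tiles in `visited` in place).
import Mathlib
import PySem

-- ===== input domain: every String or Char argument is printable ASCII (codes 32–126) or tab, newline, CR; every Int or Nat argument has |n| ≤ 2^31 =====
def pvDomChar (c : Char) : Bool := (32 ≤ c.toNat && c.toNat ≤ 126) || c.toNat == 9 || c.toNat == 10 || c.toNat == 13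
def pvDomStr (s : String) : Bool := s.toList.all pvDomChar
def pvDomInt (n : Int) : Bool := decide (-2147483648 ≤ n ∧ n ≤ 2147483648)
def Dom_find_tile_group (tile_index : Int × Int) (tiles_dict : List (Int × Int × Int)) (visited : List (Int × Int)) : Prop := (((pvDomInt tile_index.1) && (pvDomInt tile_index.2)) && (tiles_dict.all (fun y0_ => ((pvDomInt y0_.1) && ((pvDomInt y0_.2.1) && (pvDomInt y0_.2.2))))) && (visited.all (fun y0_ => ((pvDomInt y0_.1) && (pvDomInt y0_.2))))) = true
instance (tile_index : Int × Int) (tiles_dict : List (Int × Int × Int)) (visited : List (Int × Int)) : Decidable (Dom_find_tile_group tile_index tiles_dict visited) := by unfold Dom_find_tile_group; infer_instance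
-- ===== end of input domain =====

-- B replaces the explicit while-loop/stack DFS by a recursive flood-fill helper (children
-- decided and marked at the parent, recursion in reversed order) with the seed label hoisted;
-- same return value. Both Pythons also mutate `visited` in place (the equivalence proved here
-- is about the return value only; both mark exactly the grouped tiles).

-- the dict argument, as the PySem.Dict the Python dict is
def tilesDictOf (tiles_dict : List (Int × Int × Int)) : PySem.Dict (Int × Int) Int :=
  PySem.Dict.ofList (tiles_dict.map (fun p => ((p.1, p.2.1), p.2.2)))

-- ===== PORT A =====
def find_neighbor_tiles (tile_index : Int × Int) : List (Int × Int) :=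
  (if tile_index.1 > 0 then [(tile_index.1 - 1, tile_index.2)] else []) ++
  (if tile_index.1 < 4 then [(tile_index.1 + 1, tile_index.2)] else []) ++
  (if tile_index.2 > 0 then [(tile_index.1, tile_index.2 - 1)] else []) ++
  (if tile_index.2 < 4 then [(tile_index.1, tile_index.2 + 1)] else [])

-- one `for neighbor in neighbors` body: push eligible neighbor (state = pushes so far, head = latest, and visited)
def pvAStep (d : PySem.Dict (Int × Int) Int) (seed : Int × Int)
    (st : List (Int × Int) × PySem.Set (Int × Int)) (n : Int × Int) :
    List (Int × Int) × PySem.Set (Int × Int) :=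
  if d.contains n && (d.get? n == d.get? seed) && !(PySem.Set.contains st.2 n)
  then (n :: st.1, PySem.Set.add st.2 n) else st

-- the while-loop; stack head = Python stack top; raising `tiles_dict[tile_index]` is `d.get? seed`
-- (none exactly where Python raises KeyError — those inputs are outside Pre_). Fuel bounds the
-- number of pops (≤ 1 + number of dict keys), a pure totality guard.
def pvALoop (d : PySem.Dict (Int × Int) Int) (seed : Int × Int) :
    Nat → List (Int × Int) → PySem.Set (Int × Int) → List (Int × Int)
  | 0, _, _ => []
  | _ + 1, [], _ => []
  | f + 1, t :: s, v =>
      let v1 := PySem.Set.add v t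
      let pushed := (find_neighbor_tiles t).foldl (pvAStep d seed) ([], v1)
      t :: pvALoop d seed f (pushed.1 ++ s) pushed.2

def find_tile_group (tile_index : Int × Int) (tiles_dict : List (Int × Int × Int)) (visited : List (Int × Int)) : List (Int × Int) :=
  pvALoop (tilesDictOf tiles_dict) tile_index (tiles_dict.length + 1) [tile_index] (PySem.Set.ofList visited)

-- ===== PORT B =====
-- Source B's kids comprehension: candidate/guard pairs, filtered, against the hoisted `target`
def pvBKids (d : PySem.Dict (Int × Int) Int) (target : Option Int) (t : Int × Int)
    (v : PySem.Set (Int × Int)) : List (Int × Int) :=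
  (([((t.1 - 1, t.2), t.1 > 0), ((t.1 + 1, t.2), t.1 < 4),
     ((t.1, t.2 - 1), t.2 > 0), ((t.1, t.2 + 1), t.2 < 4)] : List ((Int × Int) × Bool)).filter
    (fun nc => nc.2 && d.contains nc.1 && (d.get? nc.1 == target) && !(PySem.Set.contains v nc.1))).map (·.1)

-- Source B's recursive `dfs` over a worklist of pending recursive calls: `pvBRun d tgt f (t :: ts) v`
-- is dfs(t) (mark t, compute and mark kids, recurse into reversed kids) followed by the pending
-- calls ts, threading `visited`. Fuel is a call budget threaded through (`min` only caps it for
-- the termination measure; it is provably never active) — a pure totality guard.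
def pvBRun (d : PySem.Dict (Int × Int) Int) (target : Option Int) :
    Nat → List (Int × Int) → PySem.Set (Int × Int) →
    List (Int × Int) × PySem.Set (Int × Int) × Nat
  | f, [], v => ([], v, f)
  | 0, _ :: _, v => ([], v, 0)
  | f + 1, t :: ts, v =>
      let v1 := PySem.Set.add v t
      let kids := pvBKids d target t v1
      let v2 := kids.foldl PySem.Set.add v1
      let r1 := pvBRun d target f kids.reverse v2
      let r2 := pvBRun d target (min r1.2.2 f) ts r1.2.1
      (t :: r1.1 ++ r2.1, r2.2.1, r2.2.2)
  termination_by f l => (f, l.length)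
  decreasing_by
  · exact Prod.Lex.left _ _ (Nat.lt_succ_self f)
  · exact Prod.Lex.left _ _ (Nat.lt_succ_of_le (Nat.min_le_right _ _))

def find_tile_group_alt (tile_index : Int × Int) (tiles_dict : List (Int × Int × Int)) (visited : List (Int × Int)) : List (Int × Int) :=
  (pvBRun (tilesDictOf tiles_dict) ((tilesDictOf tiles_dict).get? tile_index)
    (tiles_dict.length + 1) [tile_index] (PySem.Set.ofList visited)).1

-- ===== PRECONDITION & SPEC =====
-- Pre_ excludes exactly the inputs on which Python A raises KeyError: the seed tile is not a
-- key of tiles_dict while some of its in-bounds neighbors is (so `tiles_dict[tile_index]` is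
-- evaluated and raises).
def Pre_find_tile_group (tile_index : Int × Int) (tiles_dict : List (Int × Int × Int)) (visited : List (Int × Int)) : Prop :=
  (tilesDictOf tiles_dict).contains tile_index = true ∨
    ∀ n ∈ find_neighbor_tiles tile_index, (tilesDictOf tiles_dict).contains n = false
instance (tile_index : Int × Int) (tiles_dict : List (Int × Int × Int)) (visited : List (Int × Int)) : Decidable (Pre_find_tile_group tile_index tiles_dict visited) := by unfold Pre_find_tile_group; infer_instance

def pvWitness_find_tile_group : (Int × Int) × (List (Int × Int × Int)) × (List (Int × Int)) :=
  ((0, 0), [(0, 0, 1), (0, 1, 1), (1, 1, 2)], [])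

def Spec_find_tile_group (tile_index : Int × Int) (tiles_dict : List (Int × Int × Int)) (visited : List (Int × Int)) (out : List (Int × Int)) : Prop := out = find_tile_group_alt tile_index tiles_dict visited
instance (tile_index : Int × Int) (tiles_dict : List (Int × Int × Int)) (visited : List (Int × Int)) (out : List (Int × Int)) : Decidable (Spec_find_tile_group tile_index tiles_dict visited out) := by unfold Spec_find_tile_group; infer_instance

-- ===== CLAIM (what is proved, stated in full; the proofs are below) =====
def Claim_equal_find_tile_group : Prop := ∀ (tile_index : Int × Int) (tiles_dict : List (Int × Int × Int)) (visited : List (Int × Int)), Dom_find_tile_group tile_index tiles_dict visited → Pre_find_tile_group tile_index tiles_dict visited → Spec_find_tile_group tile_index tiles_dict visited (find_tile_group tile_index tiles_dict visited)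


-- ===== LEMMAS AND PROOFS =====

-- the shared eligibility predicate, relative to a visited set
def pvPred (d : PySem.Dict (Int × Int) Int) (target : Option Int)
    (v : PySem.Set (Int × Int)) (n : Int × Int) : Bool :=
  d.contains n && (d.get? n == target) && !(PySem.Set.contains v n)

-- A's interleaved push-and-mark fold over a duplicate-free neighbor list is: filter against the
-- initial visited set, reverse onto the accumulator, mark all kept elements.
theorem foldA_eq (d : PySem.Dict (Int × Int) Int) (seed : Int × Int) :
    ∀ (l : List (Int × Int)) (v : PySem.Set (Int × Int)) (acc : List (Int × Int)),
      l.Pairwise (· ≠ ·) →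
      l.foldl (pvAStep d seed) (acc, v) =
        ((l.filter (pvPred d (d.get? seed) v)).reverse ++ acc,
          (l.filter (pvPred d (d.get? seed) v)).foldl PySem.Set.add v) := by
  intro l
  induction l with
  | nil => intro v acc _; simp
  | cons n l ih =>
      intro v acc hp
      rw [List.pairwise_cons] at hp
      obtain ⟨hn, hp⟩ := hp
      have hstep : pvAStep d seed (acc, v) n =
          if pvPred d (d.get? seed) v n then (n :: acc, PySem.Set.add v n) else (acc, v) := rfl
      have hcongr : ∀ w, l.filter (pvPred d (d.get? seed) (PySem.Set.add w n)) =
          l.filter (pvPred d (d.get? seed) w) := by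
        intro w
        apply List.filter_congr
        intro m hm
        have : m ≠ n := (hn m hm).symm
        simp [pvPred, this]
      by_cases h : pvPred d (d.get? seed) v n = true
      · simp only [List.foldl_cons, hstep, h, if_true]
        rw [ih _ _ hp, hcongr]
        simp [h]
      · simp only [List.foldl_cons, hstep, h]
        rw [ih _ _ hp]
        simp [h]

theorem filter_pairs_fst (p : (Int × Int) → Bool) :
    ∀ ps : List ((Int × Int) × Bool),
      (ps.filter (fun nc => nc.2 && p nc.1)).map (·.1) =
        ((ps.filter (·.2)).map (·.1)).filter p := by
  intro ps
  induction ps with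
  | nil => simp
  | cons nc ps ih =>
      rcases nc with ⟨n, ok⟩
      cases ok <;> cases hp : p n <;> simp [hp, ih]

-- Source B's kids list is the neighbor list filtered by the eligibility predicate
theorem pvBKids_eq (d : PySem.Dict (Int × Int) Int) (target : Option Int)
    (t : Int × Int) (v : PySem.Set (Int × Int)) :
    pvBKids d target t v = (find_neighbor_tiles t).filter (pvPred d target v) := by
  have hcands : (([((t.1 - 1, t.2), t.1 > 0), ((t.1 + 1, t.2), t.1 < 4),
      ((t.1, t.2 - 1), t.2 > 0), ((t.1, t.2 + 1), t.2 < 4)] : List ((Int × Int) × Bool)).filter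
        (·.2)).map (·.1) = find_neighbor_tiles t := by
    by_cases h1 : (0:Int) < t.1 <;> by_cases h2 : t.1 < 4 <;>
      by_cases h3 : (0:Int) < t.2 <;> by_cases h4 : t.2 < 4 <;>
        simp [find_neighbor_tiles, h1, h2, h3, h4]
  have : pvBKids d target t v =
      (([((t.1 - 1, t.2), t.1 > 0), ((t.1 + 1, t.2), t.1 < 4),
        ((t.1, t.2 - 1), t.2 > 0), ((t.1, t.2 + 1), t.2 < 4)] : List ((Int × Int) × Bool)).filter
          (fun nc => nc.2 && pvPred d target v nc.1)).map (·.1) := by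
    simp only [pvBKids, pvPred]
    congr 1
    apply List.filter_congr
    intro nc _
    cases nc.2 <;> simp [Bool.and_assoc]
  rw [this, filter_pairs_fst, hcands]

-- the threaded fuel never grows
theorem pvBRun_fuel_le (d : PySem.Dict (Int × Int) Int) (target : Option Int) :
    ∀ (f : Nat) (l : List (Int × Int)) (v : PySem.Set (Int × Int)),
      (pvBRun d target f l v).2.2 ≤ f := by
  intro f l v
  fun_induction pvBRun d target f l v with
  | case1 => simp
  | case2 => simp
  | case3 f t ts v v1 kids v2 r1 r2 ih1 ih2 ih3 =>
      exact Nat.le_succ_of_le (le_trans ih3 (Nat.min_le_right _ _))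

-- pvBRun splits over ++ : run the first worklist, then the second on the leftover fuel and visited
theorem pvBRun_append (d : PySem.Dict (Int × Int) Int) (target : Option Int) :
    ∀ (a b : List (Int × Int)) (f : Nat) (v : PySem.Set (Int × Int)),
      pvBRun d target f (a ++ b) v =
        ((pvBRun d target f a v).1 ++
            (pvBRun d target (pvBRun d target f a v).2.2 b (pvBRun d target f a v).2.1).1,
          (pvBRun d target (pvBRun d target f a v).2.2 b (pvBRun d target f a v).2.1).2) := by
  intro a
  induction a with
  | nil => intro b f v; simp [pvBRun]
  | cons t a ih =>
      intro b f v
      cases f with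
      | zero =>
          cases b <;> simp [pvBRun]
      | succ f =>
          simp only [List.cons_append, pvBRun]
          rw [ih]
          simp [List.append_assoc]

-- the four candidate neighbors of a tile are pairwise distinct
theorem neighbors_pairwise (t : Int × Int) : (find_neighbor_tiles t).Pairwise (· ≠ ·) := by
  rcases t with ⟨r, c⟩
  by_cases h1 : (0:Int) < r <;> by_cases h2 : r < 4 <;>
    by_cases h3 : (0:Int) < c <;> by_cases h4 : c < 4 <;>
      simp [find_neighbor_tiles, h1, h2, h3, h4, List.pairwise_cons, Prod.ext_iff] <;>
        (repeat' apply And.intro) <;> (intros; omega)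

-- THE equivalence: for every fuel, A's stack loop produces exactly B's worklist recursion
theorem loop_eq_run (d : PySem.Dict (Int × Int) Int) (seed : Int × Int) :
    ∀ (f : Nat) (l : List (Int × Int)) (v : PySem.Set (Int × Int)),
      pvALoop d seed f l v = (pvBRun d (d.get? seed) f l v).1 := by
  intro f
  induction f with
  | zero => intro l v; cases l <;> simp [pvALoop, pvBRun]
  | succ f ih =>
      intro l v
      cases l with
      | nil => simp [pvALoop, pvBRun]
      | cons t s =>
          rw [pvALoop, pvBRun]
          rw [foldA_eq d seed _ _ _ (neighbors_pairwise t)]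
          rw [pvBKids_eq]
          simp only [List.append_nil]
          rw [ih]
          rw [Nat.min_eq_left (pvBRun_fuel_le d (d.get? seed) f _ _)]
          rw [pvBRun_append]
          simp

theorem find_tile_group_spec : Claim_equal_find_tile_group := by
  intro ti td vis _ _
  unfold Spec_find_tile_group find_tile_group find_tile_group_alt
  exact loop_eq_run (tilesDictOf td) ti (td.length + 1) [ti] (PySem.Set.ofList vis)
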